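-- pv_equiv track=rewrite | github.com/liuluyang/openstack_mogan_study | myweb/test/checkio/sendgrid/node-subnetworks-5-Moderate.py | subnetworks
-- ===== SOURCE A (Python) =====
-- def subnetworks(net, crushes):
--
--     new_net = []
--     for sub_con in net:
--         sub = set(sub_con)-set(crushes)
--         #print sub
--         if sub:
--             new_net.append(sub)
--     all_nodes = set([y for i in new_net for y in i])
--     #print new_net
--     #print all_nodes
--     sub_num = 0
--     review_nodes = set()
--     #print review_nodes
--     while review_nodes!=all_nodes:
--         sub_num+=1
--         _len = 0
--         sub_net = set([list(all_nodes-review_nodes)[0]])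
--         while _len < len(sub_net):
--             #print 1
--             _len = len(sub_net)
--             for link in new_net:
--                 if link & sub_net:
--                     sub_net.update(link)
--         review_nodes.update(sub_net)
--         pass
--
--     return sub_num
-- ===== SOURCE B (Python) =====
-- def subnetworks(net, crushes):
--     # single left-to-right pass: maintain a list of disjoint components,
--     # merging every component that touches the current (crush-filtered) link
--     crushed = set(crushes)
--     comps = []
--     for sub_con in net:
--         alive = set(sub_con) - crushed
--         if not alive:
--             continue
--         merged = alive
--         rest = []
--         for c in comps:
--             if c & merged:
--                 merged = merged | c
--             else:
--                 rest.append(c)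
--         rest.append(merged)
--         comps = rest
--     return len(comps)
-- ===== Notes on version B (the rewrite author's own statement) =====
-- stated objective: faster
-- what changed: A repeatedly extracts one component at a time by growing a seed set to a fixpoint with full passes over all links inside a while-loop over remaining nodes; B makes a single left-to-right pass over the links, maintaining a list of disjoint components and merging every component that touches the current link, returning the list length.
import Mathlib
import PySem

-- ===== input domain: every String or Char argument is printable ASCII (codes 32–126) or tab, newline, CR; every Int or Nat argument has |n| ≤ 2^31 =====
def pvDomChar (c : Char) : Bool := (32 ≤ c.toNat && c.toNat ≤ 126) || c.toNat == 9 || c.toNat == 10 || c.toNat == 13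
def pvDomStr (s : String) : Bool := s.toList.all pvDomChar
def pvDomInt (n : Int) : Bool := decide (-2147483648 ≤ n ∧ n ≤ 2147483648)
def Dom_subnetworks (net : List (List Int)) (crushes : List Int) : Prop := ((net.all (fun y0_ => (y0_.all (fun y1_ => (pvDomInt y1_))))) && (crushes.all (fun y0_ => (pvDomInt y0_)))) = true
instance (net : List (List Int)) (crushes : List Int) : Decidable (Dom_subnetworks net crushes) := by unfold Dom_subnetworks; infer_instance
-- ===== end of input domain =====

-- B replaces A's per-component fixpoint extraction by a single merge pass over the links (objective: faster, constant-factor).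


-- ===== PORT A =====
-- sub = set(sub_con) - set(crushes)   (used by both Pythons)
def pvAlive (crushes : List Int) (sub_con : List Int) : PySem.Set Int :=
  PySem.Set.diff (PySem.Set.ofList sub_con) (PySem.Set.ofList crushes)

-- first loop of A: new_net
def pvNewNet (net : List (List Int)) (crushes : List Int) : List (List Int) :=
  net.foldl (fun acc sub_con =>
    let sub := pvAlive crushes sub_con
    if sub = [] then acc else acc ++ [sub]) []

-- one pass of A's inner 'for link in new_net' loop
def pvPassStep (acc : PySem.Set Int) (link : List Int) : PySem.Set Int :=
  if PySem.Set.inter link acc ≠ [] then PySem.Set.update acc link else acc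

def pvPass (new_net : List (List Int)) (s : PySem.Set Int) : PySem.Set Int :=
  new_net.foldl pvPassStep s

-- A's inner 'while _len < len(sub_net)' loop; fuel |all_nodes|+1 provably suffices
def pvInner (new_net : List (List Int)) : Nat → Nat → PySem.Set Int → PySem.Set Int
  | 0, _, s => s
  | fuel+1, len, s =>
    if len < s.length then pvInner new_net fuel s.length (pvPass new_net s) else s

-- A's outer 'while review_nodes != all_nodes' loop; fuel |all_nodes|+1 provably suffices.
-- Python picks 'list(all_nodes - review_nodes)[0]' in set-iteration order; the returned COUNT
-- is independent of which unreviewed node seeds the component (proved below), so picking the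
-- first element of the modelled set difference is exact for the result.
def pvOuter (new_net : List (List Int)) (all_nodes : PySem.Set Int) :
    Nat → Int → PySem.Set Int → Int
  | 0, cnt, _ => cnt
  | fuel+1, cnt, review =>
    if PySem.Set.equal review all_nodes then cnt
    else
      match PySem.Set.diff all_nodes review with
      | [] => cnt  -- unreachable: review ⊆ all_nodes and not equal
      | x :: _ =>
        let sub := pvInner new_net (all_nodes.length + 1) 0 (PySem.Set.ofList [x])
        pvOuter new_net all_nodes fuel (cnt + 1) (PySem.Set.update review sub)

def subnetworks (net : List (List Int)) (crushes : List Int) : Int :=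
  let new_net := pvNewNet net crushes
  let all_nodes : PySem.Set Int := PySem.Set.ofList new_net.flatten
  pvOuter new_net all_nodes (all_nodes.length + 1) 0 PySem.Set.empty

-- ===== PORT B =====
-- inner 'for c in comps' loop of B: accumulate (merged, rest)
def pvMergeStep (p : PySem.Set Int × List (List Int)) (c : List Int) :
    PySem.Set Int × List (List Int) :=
  if PySem.Set.inter c p.1 ≠ [] then (PySem.Set.union p.1 c, p.2) else (p.1, p.2 ++ [c])

def pvMerge (comps : List (List Int)) (alive : PySem.Set Int) : List (List Int) :=
  let p := comps.foldl pvMergeStep (alive, [])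
  p.2 ++ [p.1]

def subnetworks_alt (net : List (List Int)) (crushes : List Int) : Int :=
  let comps := net.foldl (fun comps sub_con =>
    let alive := pvAlive crushes sub_con
    if alive = [] then comps else pvMerge comps alive) []
  (comps.length : Int)

-- ===== PRECONDITION & SPEC =====
def Spec_subnetworks (net : List (List Int)) (crushes : List Int) (out : Int) : Prop := out = subnetworks_alt net crushes
instance (net : List (List Int)) (crushes : List Int) (out : Int) : Decidable (Spec_subnetworks net crushes out) := by unfold Spec_subnetworks; infer_instance

-- ===== CLAIM (what is proved, stated in full; the proofs are below) =====
def Claim_equal_subnetworks : Prop := ∀ (net : List (List Int)) (crushes : List Int), Dom_subnetworks net crushes → Spec_subnetworks net crushes (subnetworks net crushes)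

-- ===== LEMMAS AND PROOFS =====

-- x and y lie on a common link
def pvLinked (E : List (List Int)) (x y : Int) : Prop := ∃ e ∈ E, x ∈ e ∧ y ∈ e
-- connectivity: reflexive-transitive closure of pvLinked
def pvConn (E : List (List Int)) : Int → Int → Prop := Relation.ReflTransGen (pvLinked E)
-- y occurs in some link
def pvInNodes (E : List (List Int)) (y : Int) : Prop := ∃ e ∈ E, y ∈ e
-- C is exactly one connected component of E
def pvIsClass (E : List (List Int)) (C : List Int) : Prop :=
  ∃ x, pvInNodes E x ∧ ∀ y, (y ∈ C ↔ pvConn E x y)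
-- L is a partition of E's nodes into connected components
def pvPartition (E : List (List Int)) (L : List (List Int)) : Prop :=
  (∀ C ∈ L, C.Nodup ∧ pvIsClass E C) ∧
  (∀ y, pvInNodes E y → ∃ C ∈ L, y ∈ C) ∧
  L.Pairwise List.Disjoint

-- the list of nonempty crush-filtered links, recursively
def pvAliveList (crushes : List Int) : List (List Int) → List (List Int)
  | [] => []
  | sc :: rest =>
    let sub := pvAlive crushes sc
    if sub = [] then pvAliveList crushes rest else sub :: pvAliveList crushes rest

-- basic connectivity facts ---------------------------------------------------

lemma pvConn_symm {E : List (List Int)} {x y : Int} (h : pvConn E x y) : pvConn E y x := by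
  have hsym : Symmetric (pvLinked E) := by
    intro a b hab
    obtain ⟨e, he, ha, hb⟩ := hab
    exact ⟨e, he, hb, ha⟩
  exact Relation.ReflTransGen.symmetric hsym h

lemma pvConn_trans {E : List (List Int)} {x y z : Int}
    (h1 : pvConn E x y) (h2 : pvConn E y z) : pvConn E x z := Relation.ReflTransGen.trans h1 h2

lemma pvConn_inNodes {E : List (List Int)} {x y : Int}
    (hx : pvInNodes E x) (h : pvConn E x y) : pvInNodes E y := by
  unfold pvConn at h
  induction h with
  | refl => exact hx
  | tail h1 h2 ih => obtain ⟨e, he, _, hy⟩ := h2; exact ⟨e, he, hy⟩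

lemma pvConn_mono {E E' : List (List Int)} (hsub : ∀ e ∈ E, e ∈ E') {x y : Int}
    (h : pvConn E x y) : pvConn E' x y := by
  unfold pvConn at h ⊢
  induction h with
  | refl => exact Relation.ReflTransGen.refl
  | tail h1 h2 ih =>
    obtain ⟨e, he, hb, hc⟩ := h2
    exact Relation.ReflTransGen.tail ih ⟨e, hsub e he, hb, hc⟩

lemma pvClass_rep {E : List (List Int)} {C : List Int} (h : pvIsClass E C) {s : Int}
    (hs : s ∈ C) : (pvInNodes E s) ∧ ∀ y, (y ∈ C ↔ pvConn E s y) := by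
  unfold pvIsClass at h
  obtain ⟨x, hxN, hch⟩ := h
  have hxs : pvConn E x s := (hch s).mp hs
  refine ⟨pvConn_inNodes hxN hxs, fun y => ?_⟩
  rw [hch y]
  constructor
  · intro hxy; exact pvConn_trans (pvConn_symm hxs) hxy
  · intro hsy; exact pvConn_trans hxs hsy

-- nodup counting helpers -----------------------------------------------------

lemma pvNodupLenLe {xs ys : List Int} (hx : xs.Nodup) (hy : ys.Nodup)
    (h : ∀ y ∈ xs, y ∈ ys) : xs.length ≤ ys.length := by
  have h1 : xs.toFinset.card = xs.length := List.toFinset_card_of_nodup hx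
  have h2 : ys.toFinset.card = ys.length := List.toFinset_card_of_nodup hy
  have h3 : xs.toFinset ⊆ ys.toFinset := by
    intro z hz
    rw [List.mem_toFinset] at hz ⊢
    exact h z hz
  have := Finset.card_le_card h3
  omega

lemma pvNodupMemEq {xs ys : List Int} (hx : xs.Nodup) (hy : ys.Nodup)
    (h : ∀ y ∈ xs, y ∈ ys) (hlen : ys.length ≤ xs.length) : ∀ y, y ∈ ys ↔ y ∈ xs := by
  have h1 : xs.toFinset.card = xs.length := List.toFinset_card_of_nodup hx
  have h2 : ys.toFinset.card = ys.length := List.toFinset_card_of_nodup hy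
  have h3 : xs.toFinset ⊆ ys.toFinset := by
    intro z hz
    rw [List.mem_toFinset] at hz ⊢
    exact h z hz
  have h4 : xs.toFinset = ys.toFinset := Finset.eq_of_subset_of_card_le h3 (by omega)
  intro y
  rw [← List.mem_toFinset, ← List.mem_toFinset (l := xs), h4]

-- pvNewNet = pvAliveList -----------------------------------------------------

lemma pvNewNetFold (crushes : List Int) : ∀ (net : List (List Int)) (acc : List (List Int)),
    net.foldl (fun acc sub_con =>
      let sub := pvAlive crushes sub_con
      if sub = [] then acc else acc ++ [sub]) acc
      = acc ++ pvAliveList crushes net := by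
  intro net
  induction net with
  | nil => intro acc; simp [pvAliveList]
  | cons sc rest ih =>
    intro acc
    simp only [List.foldl_cons]
    by_cases h : pvAlive crushes sc = []
    · simp only [pvAliveList, h, if_pos]
      simpa [h] using ih acc
    · simp only [pvAliveList, h, if_neg]
      have := ih (acc ++ [pvAlive crushes sc])
      simp at this ⊢
      simp [this]

lemma pvNewNet_eq (net : List (List Int)) (crushes : List Int) :
    pvNewNet net crushes = pvAliveList crushes net := by
  unfold pvNewNet
  rw [pvNewNetFold]
  simp

lemma pvAliveList_sets (crushes : List Int) (net : List (List Int)) :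
    ∀ a ∈ pvAliveList crushes net, a.Nodup ∧ a ≠ [] := by
  induction net with
  | nil => simp [pvAliveList]
  | cons sc rest ih =>
    intro a ha
    simp only [pvAliveList] at ha
    by_cases h : pvAlive crushes sc = []
    · rw [if_pos h] at ha
      exact ih a ha
    · rw [if_neg h] at ha
      rcases List.mem_cons.mp ha with rfl | ha'
      · exact ⟨PySem.Set.nodup_diff _ _ (PySem.Set.nodup_ofList _), h⟩
      · exact ih a ha'

-- pass lemmas ----------------------------------------------------------------

lemma pvInterNe {link acc : List Int} : PySem.Set.inter link acc ≠ [] ↔ ∃ z ∈ link, z ∈ acc := by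
  constructor
  · intro h
    obtain ⟨z, hz⟩ := List.exists_mem_of_ne_nil _ h
    rw [PySem.Set.mem_inter] at hz
    exact ⟨z, hz.1, hz.2⟩
  · rintro ⟨z, h1, h2⟩ hnil
    have : z ∈ PySem.Set.inter link acc := (PySem.Set.mem_inter _ _ _).mpr ⟨h1, h2⟩
    rw [hnil] at this
    simp at this

lemma pvPassStep_mem {acc : PySem.Set Int} {link : List Int} {y : Int} :
    y ∈ pvPassStep acc link ↔ (y ∈ acc ∨ (PySem.Set.inter link acc ≠ [] ∧ y ∈ link)) := by
  unfold pvPassStep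
  split
  · next h => rw [PySem.Set.mem_update]; tauto
  · next h => tauto

lemma pvPassStep_nodup {acc : PySem.Set Int} {link : List Int} (h : acc.Nodup) :
    (pvPassStep acc link).Nodup := by
  unfold pvPassStep
  split
  · exact PySem.Set.nodup_update _ _ h
  · exact h

lemma pvPassFold_mono : ∀ (l : List (List Int)) (s : PySem.Set Int) {y : Int},
    y ∈ s → y ∈ l.foldl pvPassStep s := by
  intro l
  induction l with
  | nil => intro s y h; simpa using h
  | cons e l ih => intro s y h; exact ih _ (pvPassStep_mem.mpr (Or.inl h))

lemma pvPassFold_nodup : ∀ (l : List (List Int)) (s : PySem.Set Int),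
    s.Nodup → (l.foldl pvPassStep s).Nodup := by
  intro l
  induction l with
  | nil => intro s h; simpa using h
  | cons e l ih => intro s h; exact ih _ (pvPassStep_nodup h)

lemma pvPassFold_pred {P : Int → Prop} : ∀ (l : List (List Int)) (s : PySem.Set Int),
    (∀ y ∈ s, P y) → (∀ e ∈ l, ∀ y ∈ e, P y) → ∀ y ∈ l.foldl pvPassStep s, P y := by
  intro l
  induction l with
  | nil => intro s hs _ y hy; exact hs y (by simpa using hy)
  | cons e l ih =>
    intro s hs hl
    apply ih _ _ (fun e' he' => hl e' (List.mem_cons_of_mem _ he'))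
    intro y hy
    rcases pvPassStep_mem.mp hy with h | ⟨_, hye⟩
    · exact hs y h
    · exact hl e (by simp) y hye

lemma pvPassFold_sound {E : List (List Int)} {x : Int} : ∀ (l : List (List Int)),
    (∀ e ∈ l, e ∈ E) → ∀ (s : PySem.Set Int), (∀ y ∈ s, pvConn E x y) →
    ∀ y ∈ l.foldl pvPassStep s, pvConn E x y := by
  intro l
  induction l with
  | nil => intro _ s hs y hy; exact hs y (by simpa using hy)
  | cons e l ih =>
    intro hl s hs
    apply ih (fun e' he' => hl e' (List.mem_cons_of_mem _ he'))
    intro y hy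
    rcases pvPassStep_mem.mp hy with h | ⟨hne, hye⟩
    · exact hs y h
    · obtain ⟨z, hz1, hz2⟩ := pvInterNe.mp hne
      exact Relation.ReflTransGen.tail (hs z hz2) ⟨e, hl e (by simp), hz1, hye⟩

lemma pvPassFold_absorb : ∀ (l : List (List Int)) (s : PySem.Set Int) (e : List Int),
    e ∈ l → (∃ z ∈ e, z ∈ s) → ∀ y ∈ e, y ∈ l.foldl pvPassStep s := by
  intro l
  induction l with
  | nil => intro s e he; simp at he
  | cons a l ih =>
    intro s e he hmeet y hy
    simp only [List.foldl_cons]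
    rcases List.mem_cons.mp he with rfl | he'
    · exact pvPassFold_mono l _ (pvPassStep_mem.mpr (Or.inr ⟨pvInterNe.mpr hmeet, hy⟩))
    · apply ih _ e he' _ y hy
      obtain ⟨z, hz1, hz2⟩ := hmeet
      exact ⟨z, hz1, pvPassStep_mem.mpr (Or.inl hz2)⟩

lemma pvPassFold_congr : ∀ (l : List (List Int)) (s t : PySem.Set Int),
    (∀ y, y ∈ s ↔ y ∈ t) → ∀ y, (y ∈ l.foldl pvPassStep s ↔ y ∈ l.foldl pvPassStep t) := by
  intro l
  induction l with
  | nil => intro s t h y; simpa using h y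
  | cons e l ih =>
    intro s t h
    apply ih
    intro y
    simp only [pvPassStep_mem, pvInterNe, h]

-- inner loop -----------------------------------------------------------------

lemma pvInner_fix (E : List (List Int)) (V : PySem.Set Int) (hV : V.Nodup)
    (hEV : ∀ e ∈ E, ∀ y ∈ e, y ∈ V) (x : Int) :
    ∀ (fuel : Nat) (prev : PySem.Set Int), prev.Nodup → (∀ y ∈ prev, y ∈ V) →
    (∀ y ∈ prev, pvConn E x y) →
    V.length + 1 ≤ fuel + prev.length →
    (pvInner E fuel prev.length (pvPass E prev)).Nodup ∧
    (∀ y ∈ prev, y ∈ pvInner E fuel prev.length (pvPass E prev)) ∧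
    (∀ y ∈ pvInner E fuel prev.length (pvPass E prev), pvConn E x y) ∧
    (∀ y ∈ pvPass E (pvInner E fuel prev.length (pvPass E prev)),
       y ∈ pvInner E fuel prev.length (pvPass E prev)) := by
  intro fuel
  induction fuel with
  | zero =>
    intro prev hnd hsub hsound hle
    exfalso
    have := pvNodupLenLe hnd hV hsub
    omega
  | succ fuel ih =>
    intro prev hnd hsub hsound hle
    have hsnd : (pvPass E prev).Nodup := pvPassFold_nodup _ _ hnd
    have hssub : ∀ y ∈ pvPass E prev, y ∈ V := pvPassFold_pred _ _ hsub hEV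
    have hsmono : ∀ y ∈ prev, y ∈ pvPass E prev := fun y hy => pvPassFold_mono _ _ hy
    have hssound : ∀ y ∈ pvPass E prev, pvConn E x y :=
      pvPassFold_sound _ (fun e he => he) _ hsound
    rw [pvInner]
    by_cases hlt : prev.length < (pvPass E prev).length
    · rw [if_pos hlt]
      have hrec := ih (pvPass E prev) hsnd hssub hssound (by omega)
      exact ⟨hrec.1, fun y hy => hrec.2.1 y (hsmono y hy), hrec.2.2.1, hrec.2.2.2⟩
    · rw [if_neg hlt]
      have hlen : (pvPass E prev).length ≤ prev.length := Nat.le_of_not_lt hlt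
      have hmemeq : ∀ y, y ∈ pvPass E prev ↔ y ∈ prev := pvNodupMemEq hnd hsnd hsmono hlen
      refine ⟨hsnd, hsmono, hssound, ?_⟩
      intro y hy
      exact (pvPassFold_congr E _ _ hmemeq y).mp hy

lemma pvInner_spec (E : List (List Int)) (V : PySem.Set Int) (hV : V.Nodup)
    (hEV : ∀ e ∈ E, ∀ y ∈ e, y ∈ V) (s : Int) (hs : s ∈ V) :
    (pvInner E (V.length + 1) 0 (PySem.Set.ofList [s])).Nodup ∧
    ∀ y, (y ∈ pvInner E (V.length + 1) 0 (PySem.Set.ofList [s]) ↔ pvConn E s y) := by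
  have h1 : (PySem.Set.ofList [s] : List Int) = [s] :=
    PySem.Set.ofList_eq_self_of_nodup _ (by simp)
  rw [h1]
  have hfix := pvInner_fix E V hV hEV s (V.length) [s] (by simp) (by simpa using hs)
    (by intro y hy; simp at hy; subst hy; exact Relation.ReflTransGen.refl) (by simp)
  have hstep : pvInner E (V.length + 1) 0 [s]
      = pvInner E V.length ([s] : List Int).length (pvPass E [s]) := by
    rw [pvInner]
    simp
  rw [hstep]
  refine ⟨hfix.1, fun y => ⟨fun hy => hfix.2.2.1 y hy, fun hconn => ?_⟩⟩
  unfold pvConn at hconn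
  induction hconn with
  | refl => exact hfix.2.1 s (by simp)
  | tail h1 h2 ihh =>
    obtain ⟨e, heE, hbe, hce⟩ := h2
    exact hfix.2.2.2 _ (pvPassFold_absorb E _ e heE ⟨_, hbe, ihh⟩ _ hce)

-- outer loop -----------------------------------------------------------------

lemma pvOuter_count (E : List (List Int)) (V : PySem.Set Int) (hV : V.Nodup)
    (hVN : ∀ y, y ∈ V ↔ pvInNodes E y) :
    ∀ (n : Nat) (L : List (List Int)), L.length = n →
    ∀ (fuel : Nat) (cnt : Int) (review : PySem.Set Int), review.Nodup →
    (∀ y ∈ review, y ∈ V) →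
    (∀ y, pvInNodes E y → y ∈ review ∨ ∃ C ∈ L, y ∈ C) →
    (∀ C ∈ L, (C.Nodup ∧ pvIsClass E C) ∧ ∀ y ∈ C, y ∉ review) →
    L.Pairwise List.Disjoint →
    n < fuel →
    pvOuter E V fuel cnt review = cnt + n := by
  have hEV : ∀ e ∈ E, ∀ y ∈ e, y ∈ V := fun e he y hy => (hVN y).mpr ⟨e, he, hy⟩
  intro n
  induction n with
  | zero =>
    intro L hL fuel cnt review hrnd hrsub hcover hLmem hpw hfuel
    have hLnil : L = [] := by cases L with
      | nil => rfl
      | cons a l => simp at hL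
    subst hLnil
    obtain ⟨f, rfl⟩ : ∃ f, fuel = f + 1 := ⟨fuel - 1, by omega⟩
    have heq : PySem.Set.equal review V = true := by
      rw [PySem.Set.equal_iff]
      intro z
      refine ⟨fun hz => hrsub z hz, fun hz => ?_⟩
      rcases hcover z ((hVN z).mp hz) with h | ⟨C, hC, _⟩
      · exact h
      · simp at hC
    rw [pvOuter, if_pos heq]
    simp
  | succ n ih =>
    intro L hL fuel cnt review hrnd hrsub hcover hLmem hpw hfuel
    obtain ⟨f, rfl⟩ : ∃ f, fuel = f + 1 := ⟨fuel - 1, by omega⟩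
    have hLne : L ≠ [] := by intro h; rw [h] at hL; simp at hL
    obtain ⟨C0, hC0⟩ := List.exists_mem_of_ne_nil L hLne
    obtain ⟨⟨hC0nd, hC0cls⟩, hC0rev⟩ := hLmem C0 hC0
    have hC0cls' := hC0cls
    unfold pvIsClass at hC0cls'
    obtain ⟨x, hxN, hxch⟩ := hC0cls'
    have hxC : x ∈ C0 := (hxch x).mpr Relation.ReflTransGen.refl
    have hxV : x ∈ V := (hVN x).mpr hxN
    have hneq : ¬ (PySem.Set.equal review V = true) := by
      rw [PySem.Set.equal_iff]
      intro hall
      exact hC0rev x hxC ((hall x).mpr hxV)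
    have hdne : PySem.Set.diff V review ≠ [] := by
      intro hnil
      have hx' : x ∈ PySem.Set.diff V review :=
        (PySem.Set.mem_diff _ _ _).mpr ⟨hxV, hC0rev x hxC⟩
      rw [hnil] at hx'
      simp at hx'
    cases hd : PySem.Set.diff V review with
    | nil => exact absurd hd hdne
    | cons seed rest =>
      have hseed : seed ∈ PySem.Set.diff V review := by rw [hd]; simp
      rw [PySem.Set.mem_diff] at hseed
      obtain ⟨hseedV, hseedrev⟩ := hseed
      obtain ⟨hSnd, hSmem⟩ := pvInner_spec E V hV hEV seed hseedV
      set S := pvInner E (V.length + 1) 0 (PySem.Set.ofList [seed]) with hSdef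
      rcases hcover seed ((hVN seed).mp hseedV) with h | ⟨Cs, hCsL, hseedCs⟩
      · exact absurd h hseedrev
      obtain ⟨⟨hCsnd, hCscls⟩, hCsrev⟩ := hLmem Cs hCsL
      have hrep := pvClass_rep hCscls hseedCs
      have hCsS : ∀ y, y ∈ Cs ↔ y ∈ S := fun y => by rw [hrep.2 y, ← hSmem y]
      obtain ⟨l1, l2, rfl⟩ := List.append_of_mem hCsL
      have hpw' := (List.pairwise_middle (fun h => h.symm)).mp hpw
      rw [List.pairwise_cons] at hpw'
      obtain ⟨hCsdisj, hpwrest⟩ := hpw'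
      have hlen : (l1 ++ l2).length = n := by
        simp at hL ⊢
        omega
      have happ := ih (l1 ++ l2) hlen f (cnt + 1) (PySem.Set.update review S)
        (PySem.Set.nodup_update _ _ hrnd)
        (by
          intro y hy
          rcases (PySem.Set.mem_update _ _ _).mp hy with h | h
          · exact hrsub y h
          · exact (hVN y).mpr (pvConn_inNodes ((hVN seed).mp hseedV) ((hSmem y).mp h)))
        (by
          intro y hyN
          rcases hcover y hyN with h | ⟨C, hCL, hyC⟩
          · exact Or.inl ((PySem.Set.mem_update _ _ _).mpr (Or.inl h))
          · rcases List.mem_append.mp hCL with h1 | h2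
            · exact Or.inr ⟨C, List.mem_append_left _ h1, hyC⟩
            · rcases List.mem_cons.mp h2 with rfl | h2'
              · exact Or.inl ((PySem.Set.mem_update _ _ _).mpr (Or.inr ((hCsS y).mp hyC)))
              · exact Or.inr ⟨C, List.mem_append_right _ h2', hyC⟩)
        (by
          intro C hCL'
          have hCL : C ∈ l1 ++ Cs :: l2 := by
            rcases List.mem_append.mp hCL' with h1 | h2
            · exact List.mem_append_left _ h1
            · exact List.mem_append_right _ (List.mem_cons_of_mem _ h2)
          obtain ⟨hCnc, hCrev⟩ := hLmem C hCL
          refine ⟨hCnc, ?_⟩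
          intro y hyC hyur
          rcases (PySem.Set.mem_update _ _ _).mp hyur with h | h
          · exact hCrev y hyC h
          · exact hCsdisj C hCL' ((hCsS y).mpr h) hyC)
        hpwrest
        (by omega)
      calc pvOuter E V (f + 1) cnt review
          = pvOuter E V f (cnt + 1) (PySem.Set.update review S) := by
            rw [pvOuter, if_neg hneq, hd]
        _ = (cnt + 1) + (n : Int) := happ
        _ = cnt + ((n + 1 : Nat) : Int) := by push_cast; ring

-- merge lemmas ---------------------------------------------------------------

lemma pvMergeGo (a : PySem.Set Int) :
    ∀ (l : List (List Int)) (m : PySem.Set Int) (r : List (List Int)),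
    m.Nodup → (∀ y ∈ a, y ∈ m) →
    (∀ c ∈ l, ∀ y ∈ c, y ∈ m → y ∈ a) →
    l.Pairwise List.Disjoint →
    (l.foldl pvMergeStep (m, r)).2
      = r ++ l.filter (fun c => (PySem.Set.inter c a).isEmpty) ∧
    (l.foldl pvMergeStep (m, r)).1.Nodup ∧
    (∀ y, y ∈ (l.foldl pvMergeStep (m, r)).1 ↔
       y ∈ m ∨ ∃ c ∈ l, (∃ z ∈ c, z ∈ a) ∧ y ∈ c) := by
  intro l
  induction l with
  | nil =>
    intro m r h1 _ _ _
    refine ⟨by simp, h1, by simp⟩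
  | cons c l ih =>
    intro m r hmnd ham hclose hpw
    rw [List.pairwise_cons] at hpw
    obtain ⟨hcdisj, hpw'⟩ := hpw
    simp only [List.foldl_cons]
    by_cases hg : PySem.Set.inter c m ≠ []
    · have hstep : pvMergeStep (m, r) c = (PySem.Set.union m c, r) := by
        unfold pvMergeStep
        rw [if_pos hg]
      rw [hstep]
      have hmeets : ∃ z ∈ c, z ∈ a := by
        obtain ⟨z, hz1, hz2⟩ := pvInterNe.mp hg
        exact ⟨z, hz1, hclose c (by simp) z hz1 hz2⟩
      have hfilter : ((PySem.Set.inter c a).isEmpty : Bool) = false := by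
        obtain ⟨z, hz1, hz2⟩ := hmeets
        have hzm : z ∈ PySem.Set.inter c a := (PySem.Set.mem_inter _ _ _).mpr ⟨hz1, hz2⟩
        cases hemp : ((PySem.Set.inter c a).isEmpty : Bool) with
        | false => rfl
        | true =>
          rw [List.isEmpty_iff] at hemp
          rw [hemp] at hzm
          simp at hzm
      have ih' := ih (PySem.Set.union m c) r (PySem.Set.nodup_union _ _ hmnd)
        (fun y hy => (PySem.Set.mem_union _ _ _).mpr (Or.inl (ham y hy)))
        (by
          intro c' hc' y hyc' hym
          rcases (PySem.Set.mem_union _ _ _).mp hym with h | h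
          · exact hclose c' (List.mem_cons_of_mem _ hc') y hyc' h
          · exact absurd hyc' (hcdisj c' hc' h))
        hpw'
      refine ⟨?_, ih'.2.1, ?_⟩
      · rw [ih'.1, List.filter_cons]
        simp [hfilter]
      · intro y
        rw [ih'.2.2 y, PySem.Set.mem_union]
        constructor
        · rintro ((h | h) | ⟨c', hc', hm', hy'⟩)
          · exact Or.inl h
          · exact Or.inr ⟨c, by simp, hmeets, h⟩
          · exact Or.inr ⟨c', List.mem_cons_of_mem _ hc', hm', hy'⟩
        · rintro (h | ⟨c', hc', hm', hy'⟩)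
          · exact Or.inl (Or.inl h)
          · rcases List.mem_cons.mp hc' with rfl | hc''
            · exact Or.inl (Or.inr hy')
            · exact Or.inr ⟨c', hc'', hm', hy'⟩
    · have hcm : PySem.Set.inter c m = [] := not_ne_iff.mp hg
      have hstep : pvMergeStep (m, r) c = (m, r ++ [c]) := by
        unfold pvMergeStep
        rw [if_neg hg]
      rw [hstep]
      have hnomeet : ¬ ∃ z ∈ c, z ∈ a := by
        rintro ⟨z, hz1, hz2⟩
        have : z ∈ PySem.Set.inter c m := (PySem.Set.mem_inter _ _ _).mpr ⟨hz1, ham z hz2⟩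
        rw [hcm] at this
        simp at this
      have hcapa : ((PySem.Set.inter c a).isEmpty : Bool) = true := by
        rw [List.isEmpty_iff]
        by_contra hne
        obtain ⟨z, hz⟩ := List.exists_mem_of_ne_nil _ hne
        rw [PySem.Set.mem_inter] at hz
        exact hnomeet ⟨z, hz.1, hz.2⟩
      have ih' := ih m (r ++ [c]) hmnd ham
        (fun c' hc' => hclose c' (List.mem_cons_of_mem _ hc')) hpw'
      refine ⟨?_, ih'.2.1, ?_⟩
      · rw [ih'.1, List.filter_cons]
        simp [hcapa]
      · intro y
        rw [ih'.2.2 y]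
        constructor
        · rintro (h | ⟨c', hc', hm', hy'⟩)
          · exact Or.inl h
          · exact Or.inr ⟨c', List.mem_cons_of_mem _ hc', hm', hy'⟩
        · rintro (h | ⟨c', hc', hm', hy'⟩)
          · exact Or.inl h
          · rcases List.mem_cons.mp hc' with rfl | hc''
            · exact absurd hm' hnomeet
            · exact Or.inr ⟨c', hc'', hm', hy'⟩

lemma pvMerge_partition {E : List (List Int)} {comps : List (List Int)}
    {a : PySem.Set Int} (ha : a.Nodup) (hane : a ≠ [])
    (hp : pvPartition E comps) : pvPartition (E ++ [a]) (pvMerge comps a) := by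
  unfold pvPartition at hp ⊢
  obtain ⟨hmem, hcover, hpw⟩ := hp
  have hgo := pvMergeGo a comps a [] ha (fun y hy => hy) (fun c _ y _ hya => hya) hpw
  obtain ⟨h2, hMnd, hMmem⟩ := hgo
  have hMdef : pvMerge comps a
      = (comps.foldl pvMergeStep (a, [])).2 ++ [(comps.foldl pvMergeStep (a, [])).1] := rfl
  rw [hMdef, h2]
  simp only [List.nil_append]
  have hEsub : ∀ e ∈ E, e ∈ E ++ [a] := fun e he => List.mem_append_left _ he
  have haE : a ∈ E ++ [a] := List.mem_append_right _ (by simp)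
  have hdisjall : ∀ c ∈ comps, ∀ c' ∈ comps, c ≠ c' → c.Disjoint c' := by
    intro c hc c' hc' hne
    exact List.Pairwise.forall (fun _ _ h => List.Disjoint.symm h) hpw hc hc' hne
  -- the filtered-out components are untouched classes of E ++ [a]
  have hrestcls : ∀ C, C ∈ comps.filter (fun c => (PySem.Set.inter c a).isEmpty) →
      C.Nodup ∧ pvIsClass (E ++ [a]) C ∧ C.Disjoint a := by
    intro C hC
    obtain ⟨hCc, hCp⟩ := List.mem_filter.mp hC
    have hCa : C.Disjoint a := by
      intro y hyC hya
      have : y ∈ PySem.Set.inter C a := (PySem.Set.mem_inter _ _ _).mpr ⟨hyC, hya⟩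
      rw [List.isEmpty_iff.mp hCp] at this
      simp at this
    obtain ⟨hCnd, hCcls⟩ := hmem C hCc
    refine ⟨hCnd, ?_, hCa⟩
    unfold pvIsClass at hCcls ⊢
    obtain ⟨x, hxN, hxch⟩ := hCcls
    refine ⟨x, ?_, ?_⟩
    · obtain ⟨e, he, hx⟩ := hxN
      exact ⟨e, hEsub e he, hx⟩
    · intro y
      constructor
      · intro hyC
        exact pvConn_mono hEsub ((hxch y).mp hyC)
      · intro hxy
        unfold pvConn at hxy
        induction hxy with
        | refl => exact (hxch x).mpr Relation.ReflTransGen.refl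
        | tail h1 h2 ihh =>
          obtain ⟨e, he, hbe, hye⟩ := h2
          rcases List.mem_append.mp he with heE | hea
          · exact (hxch _).mpr (pvConn_trans ((hxch _).mp ihh)
              (Relation.ReflTransGen.single ⟨e, heE, hbe, hye⟩))
          · exfalso
            have : e = a := by simpa using hea
            subst this
            exact hCa ihh hbe
  -- the merged set is one class of E ++ [a]
  obtain ⟨w, hw⟩ := List.exists_mem_of_ne_nil a hane
  set M := (comps.foldl pvMergeStep (a, [])).1 with hMset
  have hMcls : pvIsClass (E ++ [a]) M := by
    unfold pvIsClass
    refine ⟨w, ⟨a, haE, hw⟩, ?_⟩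
    intro y
    constructor
    · intro hyM
      rcases (hMmem y).mp hyM with hya | ⟨c, hc, ⟨z, hz1, hz2⟩, hyc⟩
      · exact Relation.ReflTransGen.single ⟨a, haE, hw, hya⟩
      · have hwz : pvConn (E ++ [a]) w z := Relation.ReflTransGen.single ⟨a, haE, hw, hz2⟩
        obtain ⟨hcnd, hccls⟩ := hmem c hc
        have hchar := pvClass_rep hccls hz1
        exact pvConn_trans hwz (pvConn_mono hEsub ((hchar.2 y).mp hyc))
    · intro hconn
      unfold pvConn at hconn
      induction hconn with
      | refl => exact (hMmem w).mpr (Or.inl hw)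
      | @tail b c h1 h2 ihh =>
        obtain ⟨e, he, hbe, hce⟩ := h2
        rcases List.mem_append.mp he with heE | hea
        · -- a genuine old link: go through the component of the midpoint
          have hD : ∃ D ∈ comps, (∃ z ∈ D, z ∈ a) ∧ b ∈ D := by
            rcases (hMmem b).mp ihh with hba | ⟨c', hc', hm', hbc'⟩
            · obtain ⟨D, hDc, hbD⟩ := hcover b ⟨e, heE, hbe⟩
              exact ⟨D, hDc, ⟨b, hbD, hba⟩, hbD⟩
            · exact ⟨c', hc', hm', hbc'⟩
          obtain ⟨D, hDc, hDa, hbD⟩ := hD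
          obtain ⟨hDnd, hDcls⟩ := hmem D hDc
          have hchar := pvClass_rep hDcls hbD
          have hcD := (hchar.2 c).mpr (Relation.ReflTransGen.single ⟨e, heE, hbe, hce⟩)
          exact (hMmem c).mpr (Or.inr ⟨D, hDc, hDa, hcD⟩)
        · have hea' : e = a := by simpa using hea
          subst hea'
          exact (hMmem c).mpr (Or.inl hce)
  refine ⟨?_, ?_, ?_⟩
  · intro C hC
    rcases List.mem_append.mp hC with h1 | h2
    · exact ⟨(hrestcls C h1).1, (hrestcls C h1).2.1⟩
    · have : C = M := by simpa using h2
      subst this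
      exact ⟨hMnd, hMcls⟩
  · intro y hyN
    obtain ⟨e, he, hye⟩ := hyN
    rcases List.mem_append.mp he with heE | hea
    · obtain ⟨C, hCc, hyC⟩ := hcover y ⟨e, heE, hye⟩
      by_cases hca : ((PySem.Set.inter C a).isEmpty : Bool) = true
      · exact ⟨C, List.mem_append_left _ (List.mem_filter.mpr ⟨hCc, hca⟩), hyC⟩
      · have hne : PySem.Set.inter C a ≠ [] := by
          intro hnil
          rw [List.isEmpty_iff] at hca
          exact hca hnil
        obtain ⟨z, hz1, hz2⟩ := pvInterNe.mp hne
        exact ⟨M, List.mem_append_right _ (by simp),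
          (hMmem y).mpr (Or.inr ⟨C, hCc, ⟨z, hz1, hz2⟩, hyC⟩)⟩
    · have : e = a := by simpa using hea
      subst this
      exact ⟨M, List.mem_append_right _ (by simp), (hMmem y).mpr (Or.inl hye)⟩
  · rw [List.pairwise_append]
    refine ⟨List.Pairwise.sublist List.filter_sublist hpw, by simp, ?_⟩
    intro C hCf M' hM'
    have : M' = M := by simpa using hM'
    subst this
    obtain ⟨-, -, hCa⟩ := hrestcls C hCf
    obtain ⟨hCc, hCp⟩ := List.mem_filter.mp hCf
    intro y hyC hyM
    rcases (hMmem y).mp hyM with hya | ⟨c', hc', ⟨z, hz1, hz2⟩, hyc'⟩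
    · exact hCa hyC hya
    · by_cases hcc : C = c'
      · subst hcc
        exact hCa hz1 hz2
      · exact hdisjall C hCc c' hc' hcc hyC hyc'

lemma pvMergeFold_partition :
    ∀ (as : List (List Int)) (E comps : List (List Int)),
    (∀ a ∈ as, a.Nodup ∧ a ≠ []) → pvPartition E comps →
    pvPartition (E ++ as) (as.foldl pvMerge comps) := by
  intro as
  induction as with
  | nil => intro E comps _ hp; simpa using hp
  | cons a rest ih =>
    intro E comps hall hp
    have h1 := pvMerge_partition (hall a (by simp)).1 (hall a (by simp)).2 hp
    have h2 := ih (E ++ [a]) _ (fun a' ha' => hall a' (by simp [ha'])) h1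
    simpa [List.append_assoc] using h2

lemma pvB_comps (net : List (List Int)) (crushes : List Int) :
    net.foldl (fun comps sub_con =>
      let alive := pvAlive crushes sub_con
      if alive = [] then comps else pvMerge comps alive) []
      = (pvAliveList crushes net).foldl pvMerge [] := by
  suffices h : ∀ (l : List (List Int)) (comps : List (List Int)),
      l.foldl (fun comps sub_con =>
        let alive := pvAlive crushes sub_con
        if alive = [] then comps else pvMerge comps alive) comps
        = (pvAliveList crushes l).foldl pvMerge comps by
    exact h net []
  intro l
  induction l with
  | nil => intro comps; simp [pvAliveList]
  | cons sc rest ih =>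
    intro comps
    by_cases h : pvAlive crushes sc = []
    · simp [pvAliveList, h, ih]
    · simp [pvAliveList, h, ih]

-- counting -------------------------------------------------------------------

lemma pvLenLeFlatten : ∀ (L : List (List Int)), (∀ C ∈ L, C ≠ []) → L.length ≤ L.flatten.length := by
  intro L
  induction L with
  | nil => simp
  | cons C L ih =>
    intro h
    simp only [List.flatten_cons, List.length_append, List.length_cons]
    have h1 : 0 < C.length := List.length_pos_of_ne_nil (h C (by simp))
    have h2 := ih (fun C' hC' => h C' (by simp [hC']))
    omega

lemma pvPartition_length_le {E : List (List Int)} {L : List (List Int)}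
    (hp : pvPartition E L) {V : PySem.Set Int} (hV : V.Nodup)
    (hVN : ∀ y, y ∈ V ↔ pvInNodes E y) : L.length ≤ V.length := by
  unfold pvPartition at hp
  obtain ⟨hmem, hcover, hpw⟩ := hp
  have h1 : L.flatten.Nodup := List.nodup_flatten.mpr ⟨fun l hl => (hmem l hl).1, hpw⟩
  have h2 : ∀ y ∈ L.flatten, y ∈ V := by
    intro y hy
    obtain ⟨C, hC, hyC⟩ := List.mem_flatten.mp hy
    obtain ⟨-, hcls⟩ := hmem C hC
    exact (hVN y).mpr (pvClass_rep hcls hyC).1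
  have h3 : L.flatten.length ≤ V.length := pvNodupLenLe h1 hV h2
  have h4 : L.length ≤ L.flatten.length := by
    apply pvLenLeFlatten
    intro C hC hnil
    obtain ⟨-, hcls⟩ := hmem C hC
    unfold pvIsClass at hcls
    obtain ⟨x, -, hch⟩ := hcls
    have : x ∈ C := (hch x).mpr Relation.ReflTransGen.refl
    rw [hnil] at this
    simp at this
  omega

-- ===== VERDICT (by name: the statement is the Claim_ definition above) =====
theorem subnetworks_spec : Claim_equal_subnetworks := by
  unfold Claim_equal_subnetworks
  intro net crushes _hdom
  unfold Spec_subnetworks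
  simp only [subnetworks, subnetworks_alt]
  rw [pvB_comps net crushes, pvNewNet_eq net crushes]
  have hVnd : (PySem.Set.ofList (pvAliveList crushes net).flatten).Nodup :=
    PySem.Set.nodup_ofList _
  have hVN : ∀ y, y ∈ PySem.Set.ofList (pvAliveList crushes net).flatten
      ↔ pvInNodes (pvAliveList crushes net) y := by
    intro y
    rw [PySem.Set.mem_ofList, List.mem_flatten]
    rfl
  have hempty : pvPartition ([] : List (List Int)) ([] : List (List Int)) := by
    unfold pvPartition
    refine ⟨by simp, ?_, by simp⟩
    rintro y ⟨e, he, -⟩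
    simp at he
  have hpart : pvPartition (pvAliveList crushes net)
      ((pvAliveList crushes net).foldl pvMerge []) := by
    have := pvMergeFold_partition (pvAliveList crushes net) [] []
      (pvAliveList_sets crushes net) hempty
    simpa using this
  have hlen := pvPartition_length_le hpart hVnd hVN
  have hout := pvOuter_count (pvAliveList crushes net)
      (PySem.Set.ofList (pvAliveList crushes net).flatten) hVnd hVN
      ((pvAliveList crushes net).foldl pvMerge []).length
      ((pvAliveList crushes net).foldl pvMerge []) rfl
      ((PySem.Set.ofList (pvAliveList crushes net).flatten).length + 1) 0 []
      (by simp) (by simp)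
      (by
        intro y hy
        unfold pvPartition at hpart
        exact Or.inr (hpart.2.1 y hy))
      (by
        intro C hC
        unfold pvPartition at hpart
        exact ⟨hpart.1 C hC, by simp⟩)
      (by unfold pvPartition at hpart; exact hpart.2.2)
      (by omega)
  have hemp : (PySem.Set.empty : List Int) = [] := rfl
  rw [hemp, hout]
  simp
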